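-- pv_equiv track=rewrite | github.com/Jouca/Tetris | modules/paul.py | list_conversion
-- ===== SOURCE A (Python) =====
-- def list_conversion(liste, orientation):
--     """Prend une liste `liste` et la renvoie sous forme "compactée"
--     par rapport à l'orientation.
--     >>> list_conversion(Liste1, 0)
--     [[(1, 0), 1], [(0, 1), 2]]
--     """
--     # Rajoute une coordonnée qui permet seulement de pouvoir parcourir
--     # toute la liste. C'est 5 car la coordonnée maximal est 3
--     liste.append((5, 5))
--     size = len(liste)
--     rank = 1
--     return_list = []
--     # Le nombre de coordonnées côte à côte augmente quand il y en a
--     # plusieurs et se réinitialise à chaque différence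
--     dimension = 1
--     # Permet de savoir si cela doit être la coordonnée X ou Y qui doit
--     # être identique
--     if orientation % 2 == 0:
--         spot = 0
--     else:
--         spot = 1
--     # Si il y a plusieurs coordonnées côte à côte, cela garde la
--     # première coordonnée, donc la plus petite
--     backup = liste[0]
--     while rank < size:
--         if backup[spot] != liste[rank][spot]:
--             return_list.append([backup, dimension])
--             backup = liste[rank]
--             dimension = 1
--         elif backup[spot] == liste[rank][spot]:
--             dimension += 1
--         rank += 1
--     return return_list
-- ===== SOURCE B (Python) =====
-- def list_conversion(liste, orientation):
--     # Same sentinel append mutation as the original; builds the group list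
--     # back-to-front by merging each element into the current head group.
--     liste.append((5, 5))
--     spot = orientation % 2
--     groups = []
--     for c in reversed(liste):
--         if groups and groups[0][0][spot] == c[spot]:
--             groups[0] = [c, groups[0][1] + 1]
--         else:
--             groups.insert(0, [c, 1])
--     return groups[:-1]
-- ===== Notes on version B (the rewrite author's own statement) =====
-- stated objective: alternative
-- what changed: B builds the group list back-to-front (iterating the sentinel-appended list in reverse, merging each element into the current head group) and drops the trailing sentinel group, replacing A's forward scan with backup/dimension accumulator state and per-boundary flush.
import Mathlib
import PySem

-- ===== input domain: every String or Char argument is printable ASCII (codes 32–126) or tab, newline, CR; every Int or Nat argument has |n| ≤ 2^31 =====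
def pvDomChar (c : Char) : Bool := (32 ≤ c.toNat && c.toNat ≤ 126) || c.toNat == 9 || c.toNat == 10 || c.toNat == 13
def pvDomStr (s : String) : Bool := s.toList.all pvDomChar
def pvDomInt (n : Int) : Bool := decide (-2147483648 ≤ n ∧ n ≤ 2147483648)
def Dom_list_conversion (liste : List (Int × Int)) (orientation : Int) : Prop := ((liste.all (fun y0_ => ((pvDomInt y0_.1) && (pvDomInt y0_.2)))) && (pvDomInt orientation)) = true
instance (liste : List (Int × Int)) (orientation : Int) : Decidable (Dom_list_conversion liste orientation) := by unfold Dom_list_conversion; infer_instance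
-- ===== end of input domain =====

-- B builds the group list back-to-front by folding from the right, merging each
-- element into the head group, instead of A's forward scan with a backup/dimension
-- accumulator flushed at each key change (objective: alternative, same cost).
-- Both Pythons append the sentinel (5,5) to the argument list (same mutation);
-- the equivalence proved here is about the return value.

-- ===== PORT A =====
-- tuple indexing backup[spot] (spot is 0 or 1)
def pvGetSpot (p : Int × Int) (spot : Int) : Int := if spot = 0 then p.1 else p.2

-- one iteration of A's while loop: state (return_list, backup, dimension)
def pvStepA (spot : Int) (st : List ((Int × Int) × Int) × (Int × Int) × Int)
    (c : Int × Int) : List ((Int × Int) × Int) × (Int × Int) × Int :=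
  let (ret, backup, dim) := st
  if pvGetSpot backup spot ≠ pvGetSpot c spot then
    (ret ++ [(backup, dim)], c, 1)
  else
    (ret, backup, dim + 1)

def list_conversion (liste : List (Int × Int)) (orientation : Int) : List ((Int × Int) × Int) :=
  let l := liste ++ [((5 : Int), (5 : Int))]
  let spot : Int := if PySem.Int.mod orientation 2 = 0 then 0 else 1
  let backup := l.headD (5, 5)   -- liste[0]; l is nonempty after the append
  -- the while loop walks liste[1:] in order
  (l.tail.foldl (pvStepA spot) ([], backup, 1)).1

-- ===== PORT B =====
-- one iteration of B's loop over reversed(liste): merge c into the head group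
def pvAddG (spot : Int) (c : Int × Int) (gs : List ((Int × Int) × Int)) :
    List ((Int × Int) × Int) :=
  match gs with
  | [] => [(c, 1)]
  | (b, n) :: t =>
    if pvGetSpot b spot = pvGetSpot c spot then (c, n + 1) :: t
    else (c, 1) :: (b, n) :: t

def list_conversion_alt (liste : List (Int × Int)) (orientation : Int) : List ((Int × Int) × Int) :=
  let l := liste ++ [((5 : Int), (5 : Int))]
  let spot : Int := if PySem.Int.mod orientation 2 = 0 then 0 else 1
  -- 'for c in reversed(l)' building groups front-ward = foldr; groups[:-1] = dropLast
  (l.foldr (pvAddG spot) []).dropLast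

-- ===== PRECONDITION & SPEC =====
def Spec_list_conversion (liste : List (Int × Int)) (orientation : Int) (out : List ((Int × Int) × Int)) : Prop := out = list_conversion_alt liste orientation
instance (liste : List (Int × Int)) (orientation : Int) (out : List ((Int × Int) × Int)) : Decidable (Spec_list_conversion liste orientation out) := by unfold Spec_list_conversion; infer_instance

-- ===== CLAIM (what is proved, stated in full; the proofs are below) =====
def Claim_equal_list_conversion : Prop := ∀ (liste : List (Int × Int)) (orientation : Int), Dom_list_conversion liste orientation → Spec_list_conversion liste orientation (list_conversion liste orientation)

-- ===== LEMMAS AND PROOFS =====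

-- merge a pending group (b, d) into the front of a group list
def pvMerge (spot : Int) (b : Int × Int) (d : Int) (gs : List ((Int × Int) × Int)) :
    List ((Int × Int) × Int) :=
  match gs with
  | [] => [(b, d)]
  | (c, n) :: t =>
    if pvGetSpot c spot = pvGetSpot b spot then (b, d + n) :: t
    else (b, d) :: (c, n) :: t

theorem pvAddG_eq_merge (spot : Int) (c : Int × Int) (gs : List ((Int × Int) × Int)) :
    pvAddG spot c gs = pvMerge spot c 1 gs := by
  cases gs with
  | nil => rfl
  | cons g t =>
    obtain ⟨b, n⟩ := g
    simp only [pvAddG, pvMerge]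
    by_cases h : pvGetSpot b spot = pvGetSpot c spot
    · simp [h, Int.add_comm]
    · simp [h]

theorem pvMerge_ne_nil (spot : Int) (b : Int × Int) (d : Int) (gs : List ((Int × Int) × Int)) :
    pvMerge spot b d gs ≠ [] := by
  cases gs with
  | nil => simp [pvMerge]
  | cons g t => obtain ⟨c, n⟩ := g; simp only [pvMerge]; split_ifs <;> simp

theorem pvMerge_merge_eq (spot : Int) (b c : Int × Int) (d : Int)
    (gs : List ((Int × Int) × Int)) (h : pvGetSpot c spot = pvGetSpot b spot) :
    pvMerge spot b d (pvMerge spot c 1 gs) = pvMerge spot b (d + 1) gs := by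
  cases gs with
  | nil => simp [pvMerge, h]
  | cons g t =>
    obtain ⟨e, n⟩ := g
    simp only [pvMerge]
    by_cases he : pvGetSpot e spot = pvGetSpot c spot
    · simp [he, h]
      ring
    · have heb : ¬ pvGetSpot e spot = pvGetSpot b spot := fun hb => he (hb.trans h.symm)
      simp [heb, h]

theorem pvMerge_merge_ne (spot : Int) (b c : Int × Int) (d : Int)
    (gs : List ((Int × Int) × Int)) (h : ¬ pvGetSpot c spot = pvGetSpot b spot) :
    pvMerge spot b d (pvMerge spot c 1 gs) = (b, d) :: pvMerge spot c 1 gs := by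
  cases gs with
  | nil => simp [pvMerge, h]
  | cons g t =>
    obtain ⟨e, n⟩ := g
    simp only [pvMerge]
    by_cases he : pvGetSpot e spot = pvGetSpot c spot <;> simp [he, h]

-- A's loop invariant: the flushed groups plus the pending (backup, dimension) group,
-- with the last group dropped, match B's right-fold grouping of the remainder.
theorem pvFoldA_eq (spot : Int) (xs : List (Int × Int)) :
    ∀ (acc : List ((Int × Int) × Int)) (b : Int × Int) (d : Int),
      (xs.foldl (pvStepA spot) (acc, b, d)).1
        = acc ++ (pvMerge spot b d (xs.foldr (pvAddG spot) [])).dropLast := by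
  induction xs with
  | nil => intro acc b d; simp [pvMerge]
  | cons c xs ih =>
    intro acc b d
    simp only [List.foldl_cons, List.foldr_cons, pvStepA]
    by_cases h : pvGetSpot b spot = pvGetSpot c spot
    · simp only [h, ne_eq, not_true_eq_false, if_false]
      rw [ih acc b (d + 1), pvAddG_eq_merge,
        pvMerge_merge_eq spot b c d _ h.symm]
    · simp only [ne_eq, h, not_false_eq_true, if_true]
      rw [ih (acc ++ [(b, d)]) c 1, pvAddG_eq_merge,
        pvMerge_merge_ne spot b c d _ (fun hc => h hc.symm),
        List.dropLast_cons_of_ne_nil (pvMerge_ne_nil spot c 1 _)]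
      simp

-- ===== VERDICT (by name: the statement is the Claim_ definition above) =====
theorem list_conversion_spec : Claim_equal_list_conversion := by
  intro liste orientation _
  unfold Spec_list_conversion list_conversion list_conversion_alt
  cases liste with
  | nil => simp [pvAddG]
  | cons x xs =>
    simp only [List.cons_append, List.headD_cons, List.tail_cons, List.foldr_cons]
    rw [pvFoldA_eq, pvAddG_eq_merge]
    simp
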